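-- pv_equiv track=rewrite | github.com/limrp/swga2_helper_scripts | summarize_gaps.py | compute_fr_gaps_alternating
-- ===== SOURCE A (Python) =====
-- def compute_fr_gaps_alternating(positions_forward, positions_reverse, threshold: int):
--     """
--     SWGA2-style F→R gaps:
--     For each forward site, find all reverse sites that are at the same or greater
--     position and at most 'threshold' bp away, and record their distances.
--
--     This mirrors the logic of optimize.get_positional_gap_lengths_alternating
--     and the manual loop in summarize_sets.py.
--
--     Parameters
--     ----------
--     positions_forward : list[int]
--         Positions (0-based) of binding sites on the forward strand.
--     positions_reverse : list[int]
--         Positions (0-based) of binding sites on the reverse strand.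
--     threshold : int
--         Maximum allowed distance (bp) between F and R to be included.
--
--     Returns
--     -------
--     list[int]
--         All forward→reverse distances (in bp) that satisfy:
--         R >= F  and  R - F <= threshold.
--     """
--     # Ensure positions are sorted (SWGA2 assumes sorted lists).
--     fwd = sorted(positions_forward)
--     rev = sorted(positions_reverse)
--
--     gaps = []
--     i = j = 0
--
--     # Two-pointer scan: walk forward and reverse lists together.
--     while i < len(fwd) and j < len(rev):
--         # Move the reverse pointer until it is not behind the current forward site.
--         while j < len(rev) and rev[j] < fwd[i]:
--             j += 1
--
--         # Now try all reverse sites starting at 'j' that are within threshold.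
--         sub_j = j
--         while (
--             sub_j < len(rev)
--             and rev[sub_j] - fwd[i] <= threshold
--             and rev[sub_j] >= fwd[i]
--         ):
--             gaps.append(rev[sub_j] - fwd[i])
--             sub_j += 1
--
--         # Advance to the next forward site.
--         i += 1
--
--     return gaps
-- ===== SOURCE B (Python) =====
-- import bisect
--
--
-- def compute_fr_gaps_alternating(positions_forward, positions_reverse, threshold: int):
--     """Sorted lists + per-forward-site binary search into the reverse list."""
--     fwd = sorted(positions_forward)
--     rev = sorted(positions_reverse)
--
--     gaps = []
--     for f in fwd:
--         lo = bisect.bisect_left(rev, f)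
--         hi = bisect.bisect_right(rev, f + threshold)
--         for r in rev[lo:hi]:
--             gaps.append(r - f)
--     return gaps
-- ===== Notes on version B (the rewrite author's own statement) =====
-- stated objective: faster
-- what changed: Replaced A's index-juggling two-pointer merge (outer pointer, catch-up pointer and a rescanning sub-pointer whose window A re-walks for every forward site) by a per-forward-site bisect_left/bisect_right binary search into the sorted reverse list, iterating only the resulting slice.
import Mathlib
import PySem

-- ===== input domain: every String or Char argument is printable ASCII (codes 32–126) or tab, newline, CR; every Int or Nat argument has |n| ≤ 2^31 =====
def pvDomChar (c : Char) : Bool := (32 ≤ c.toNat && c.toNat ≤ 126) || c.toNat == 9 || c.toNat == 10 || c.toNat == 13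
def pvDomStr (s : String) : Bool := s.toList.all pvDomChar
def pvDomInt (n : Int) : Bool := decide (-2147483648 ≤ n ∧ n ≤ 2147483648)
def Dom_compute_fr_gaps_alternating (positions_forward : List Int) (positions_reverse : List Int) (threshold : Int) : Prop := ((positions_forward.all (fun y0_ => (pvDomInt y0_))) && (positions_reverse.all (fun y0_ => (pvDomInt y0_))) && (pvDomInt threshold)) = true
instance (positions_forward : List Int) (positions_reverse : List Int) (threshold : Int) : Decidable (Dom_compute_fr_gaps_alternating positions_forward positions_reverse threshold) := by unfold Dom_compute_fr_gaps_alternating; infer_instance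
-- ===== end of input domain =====

-- B replaces A's index-juggling two-pointer scan by a per-forward-site binary search
-- (bisect_left/bisect_right) into the sorted reverse list; objective: alternative/simpler.

-- ===== PORT A =====
-- inner 'while j < len(rev) and rev[j] < fwd[i]: j += 1'
def pvAdvance (rev : List Int) (f : Int) (j : Nat) : Nat :=
  if h : j < rev.length then
    if rev[j] < f then pvAdvance rev f (j + 1) else j
  else j
termination_by rev.length - j

-- inner 'while sub_j < len(rev) and rev[sub_j] - fwd[i] <= threshold and rev[sub_j] >= fwd[i]: gaps.append(...); sub_j += 1'
def pvCollect (rev : List Int) (f t : Int) (sj : Nat) (gaps : List Int) : List Int :=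
  if h : sj < rev.length then
    if rev[sj] - f ≤ t ∧ rev[sj] ≥ f then
      pvCollect rev f t (sj + 1) (gaps ++ [rev[sj] - f])
    else gaps
  else gaps
termination_by rev.length - sj

-- outer 'while i < len(fwd) and j < len(rev)'
def pvOuter (fwd rev : List Int) (t : Int) (i j : Nat) (gaps : List Int) : List Int :=
  if h : i < fwd.length ∧ j < rev.length then
    let j' := pvAdvance rev fwd[i] j
    let gaps' := pvCollect rev fwd[i] t j' gaps
    pvOuter fwd rev t (i + 1) j' gaps'
  else gaps
termination_by fwd.length - i

def compute_fr_gaps_alternating (positions_forward : List Int) (positions_reverse : List Int) (threshold : Int) : List Int :=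
  let fwd := PySem.List.sorted positions_forward (fun x => x)
  let rev := PySem.List.sorted positions_reverse (fun x => x)
  pvOuter fwd rev threshold 0 0 []

-- ===== PORT B =====
def compute_fr_gaps_alternating_alt (positions_forward : List Int) (positions_reverse : List Int) (threshold : Int) : List Int :=
  let fwd := PySem.List.sorted positions_forward (fun x => x)
  let rev := PySem.List.sorted positions_reverse (fun x => x)
  fwd.foldl (fun gaps f =>
    let lo := PySem.List.bisectLeft rev f
    let hi := PySem.List.bisectRight rev (f + threshold)
    (PySem.List.slice rev (some (lo : Int)) (some (hi : Int))).foldl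
      (fun g r => g ++ [r - f]) gaps) []

-- ===== PRECONDITION & SPEC =====
def Spec_compute_fr_gaps_alternating (positions_forward : List Int) (positions_reverse : List Int) (threshold : Int) (out : List Int) : Prop := out = compute_fr_gaps_alternating_alt positions_forward positions_reverse threshold
instance (positions_forward : List Int) (positions_reverse : List Int) (threshold : Int) (out : List Int) : Decidable (Spec_compute_fr_gaps_alternating positions_forward positions_reverse threshold out) := by unfold Spec_compute_fr_gaps_alternating; infer_instance

-- ===== CLAIM (what is proved, stated in full; the proofs are below) =====
def Claim_equal_compute_fr_gaps_alternating : Prop := ∀ (positions_forward : List Int) (positions_reverse : List Int) (threshold : Int), Dom_compute_fr_gaps_alternating positions_forward positions_reverse threshold → Spec_compute_fr_gaps_alternating positions_forward positions_reverse threshold (compute_fr_gaps_alternating positions_forward positions_reverse threshold)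

-- ===== LEMMAS AND PROOFS =====

-- the canonical value both programs compute for one forward site f
def pvPiece (rev : List Int) (f t : Int) : List Int :=
  (rev.filter (fun r => decide (f ≤ r) && decide (r - f ≤ t))).map (fun r => r - f)

-- sorted-list getElem monotonicity
theorem pvSortedGet {l : List Int} (hs : l.Pairwise (· ≤ ·)) {i j : Nat}
    (hij : i ≤ j) (hj : j < l.length) : l[i]'(by omega) ≤ l[j] := by
  rcases Nat.lt_or_ge i j with h | h
  · exact (List.pairwise_iff_getElem.mp hs) i j (by omega) hj h
  · have : i = j := by omega
    subst this; exact le_refl _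

-- takeWhile prefix: elements before the boundary satisfy p
theorem pvTwGet {l : List Int} {p : Int → Bool} {j : Nat} (hj : j < l.length)
    (h : j < (l.takeWhile p).length) : p l[j] = true := by
  induction l generalizing j with
  | nil => simp at hj
  | cons a l ih =>
    cases hp : p a with
    | false => simp [List.takeWhile, hp] at h
    | true =>
      cases j with
      | zero => simpa using hp
      | succ j =>
        simp only [List.takeWhile, hp] at h
        exact ih (by simpa using hj) (by simpa using h)

-- past the boundary, a downward-closed predicate fails (on a sorted list)
theorem pvTwGetPast {l : List Int} {p : Int → Bool}
    (hdc : ∀ a b : Int, a ≤ b → p b = true → p a = true)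
    (hs : l.Pairwise (· ≤ ·)) {j : Nat} (hj : j < l.length)
    (h : (l.takeWhile p).length ≤ j) : p l[j] = false := by
  induction l generalizing j with
  | nil => simp at hj
  | cons a l ih =>
    rw [List.pairwise_cons] at hs
    obtain ⟨hall, hs⟩ := hs
    cases hp : p a with
    | true =>
      cases j with
      | zero => simp [List.takeWhile, hp] at h
      | succ j =>
        simp only [List.takeWhile, hp, List.length_cons] at h
        exact ih hs (by simpa using hj) (by omega)
    | false =>
      cases j with
      | zero => simpa using hp
      | succ j =>
        have hj' : j < l.length := by simpa using hj
        have hmem : l[j] ∈ l := List.getElem_mem hj'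
        have hab := hall _ hmem
        cases hpj : p (l[j]'hj') with
        | false => simpa using hpj
        | true =>
          have := hdc a _ hab hpj
          rw [this] at hp
          exact absurd hp (by simp)

theorem pvTwLen {l : List α} {p : α → Bool} : (l.takeWhile p).length ≤ l.length :=
  (List.takeWhile_sublist p).length_le

theorem pvTakeTw {l : List α} {p : α → Bool} :
    l.take (l.takeWhile p).length = l.takeWhile p := by
  calc l.take (l.takeWhile p).length
      = (l.takeWhile p ++ l.dropWhile p).take (l.takeWhile p).length := by
        rw [List.takeWhile_append_dropWhile]
    _ = l.takeWhile p := List.take_left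

theorem pvDropTw {l : List α} {p : α → Bool} :
    l.drop (l.takeWhile p).length = l.dropWhile p := by
  calc l.drop (l.takeWhile p).length
      = (l.takeWhile p ++ l.dropWhile p).drop (l.takeWhile p).length := by
        rw [List.takeWhile_append_dropWhile]
    _ = l.dropWhile p := List.drop_left

-- bisectLeft on a sorted list is the length of the takeWhile (< x) prefix
theorem pvBisectLeftEq (rev : List Int) (x : Int) (hs : rev.Pairwise (· ≤ ·)) :
    PySem.List.bisectLeft rev x = (rev.takeWhile (fun r => decide (r < x))).length := by
  obtain ⟨hle, hlt, hge⟩ := PySem.List.bisectLeft_spec rev x hs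
  set a := PySem.List.bisectLeft rev x with ha
  set b := (rev.takeWhile (fun r => decide (r < x))).length with hb
  have hble : b ≤ rev.length := pvTwLen
  rcases Nat.lt_trichotomy a b with h | h | h
  · have hj : a < rev.length := by omega
    have := pvTwGet hj (by omega)
    have := hge a hj (le_refl _)
    simp at *; omega
  · exact h
  · have hj : b < rev.length := by omega
    have h1 := hlt b hj h
    have h2 := pvTwGetPast (p := fun r => decide (r < x))
      (fun a b hab hb => by simp at *; omega) hs hj (le_refl _)
    simp at h2; omega

theorem pvBisectRightEq (rev : List Int) (x : Int) (hs : rev.Pairwise (· ≤ ·)) :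
    PySem.List.bisectRight rev x = (rev.takeWhile (fun r => decide (r ≤ x))).length := by
  obtain ⟨hle, hlt, hge⟩ := PySem.List.bisectRight_spec rev x hs
  set a := PySem.List.bisectRight rev x with ha
  set b := (rev.takeWhile (fun r => decide (r ≤ x))).length with hb
  have hble : b ≤ rev.length := pvTwLen
  rcases Nat.lt_trichotomy a b with h | h | h
  · have hj : a < rev.length := by omega
    have := pvTwGet hj (by omega)
    have := hge a hj (le_refl _)
    simp at *; omega
  · exact h
  · have hj : b < rev.length := by omega
    have h1 := hlt b hj h
    have h2 := pvTwGetPast (p := fun r => decide (r ≤ x))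
      (fun a b hab hb => by simp at *; omega) hs hj (le_refl _)
    simp at h2; omega

-- every element surviving dropWhile (< f) on a sorted list is ≥ f
theorem pvDropWhileGe {l : List Int} {f : Int} (hs : l.Pairwise (· ≤ ·))
    {x : Int} (hx : x ∈ l.dropWhile (fun r => decide (r < f))) : f ≤ x := by
  induction l with
  | nil => simp at hx
  | cons a l ih =>
    rw [List.pairwise_cons] at hs
    obtain ⟨hall, hs⟩ := hs
    by_cases ha : a < f
    · rw [List.dropWhile_cons_of_pos (by simpa using ha)] at hx
      exact ih hs hx
    · rw [List.dropWhile_cons_of_neg (by simpa using ha)] at hx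
      rcases List.mem_cons.mp hx with rfl | hx
      · omega
      · exact le_trans (by omega) (hall _ hx)


-- on a sorted list whose elements are all ≥ f, takeWhile (≤ f+t) is filter (f ≤ · ∧ · - f ≤ t)
theorem pvTwEqFilter {l : List Int} {f t : Int} (hs : l.Pairwise (· ≤ ·))
    (hge : ∀ x ∈ l, f ≤ x) :
    l.takeWhile (fun r => decide (r ≤ f + t)) =
      l.filter (fun r => decide (f ≤ r) && decide (r - f ≤ t)) := by
  induction l with
  | nil => rfl
  | cons a l ih =>
    rw [List.pairwise_cons] at hs
    obtain ⟨hall, hs⟩ := hs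
    have hfa : f ≤ a := hge a (by simp)
    by_cases hat : a ≤ f + t
    · rw [List.takeWhile_cons_of_pos (by simpa using hat),
        List.filter_cons_of_pos (by simp; omega)]
      rw [ih hs (fun x hx => hge x (by simp [hx]))]
    · rw [List.takeWhile_cons_of_neg (by simpa using hat),
        List.filter_cons_of_neg (by simp; omega)]
      symm
      rw [List.filter_eq_nil_iff]
      intro b hb
      have := hall b hb
      simp; omega

-- takeWhile over an append whose left part wholly satisfies p
theorem pvTwAppend {a b : List Int} {p : Int → Bool} (h : ∀ x ∈ a, p x = true) :
    (a ++ b).takeWhile p = a ++ b.takeWhile p := by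
  induction a with
  | nil => simp
  | cons x a ih =>
    rw [List.cons_append, List.takeWhile_cons_of_pos (h x (by simp)),
      ih (fun y hy => h y (by simp [hy])), List.cons_append]

-- shorter takeWhile for a stronger predicate
theorem pvTwLenMono {l : List Int} {p q : Int → Bool} (h : ∀ x, p x = true → q x = true) :
    (l.takeWhile p).length ≤ (l.takeWhile q).length := by
  induction l with
  | nil => simp
  | cons a l ih =>
    cases hp : p a with
    | false =>
      simp only [List.takeWhile, hp]
      cases q a <;> simp
    | true =>
      simp only [List.takeWhile, hp, h a hp, List.length_cons]
      omega

-- membership-based congruence for takeWhile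
theorem pvTwCongr {l : List Int} {p q : Int → Bool} (h : ∀ x ∈ l, p x = q x) :
    l.takeWhile p = l.takeWhile q := by
  induction l with
  | nil => rfl
  | cons a l ih =>
    have ha := h a (by simp)
    cases hq : q a with
    | true =>
      rw [List.takeWhile_cons_of_pos (ha.trans hq), List.takeWhile_cons_of_pos hq,
        ih (fun x hx => h x (by simp [hx]))]
    | false =>
      rw [List.takeWhile_cons_of_neg (by simp [ha, hq]), List.takeWhile_cons_of_neg (by simp [hq])]

-- the shared core: slice between the two boundaries = pvPiece, on a sorted list
theorem pvSliceCore (rev : List Int) (f t : Int) (hs : rev.Pairwise (· ≤ ·)) :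
    ((rev.drop (rev.takeWhile (fun r => decide (r < f))).length).take
        ((rev.takeWhile (fun r => decide (r ≤ f + t))).length -
          (rev.takeWhile (fun r => decide (r < f))).length)).map (fun r => r - f) =
      pvPiece rev f t := by
  have hdw : rev.drop (rev.takeWhile (fun r => decide (r < f))).length =
      rev.dropWhile (fun r => decide (r < f)) := pvDropTw
  have hdws : (rev.dropWhile (fun r => decide (r < f))).Pairwise (· ≤ ·) :=
    List.Pairwise.sublist (List.dropWhile_sublist _) hs
  have hge : ∀ x ∈ rev.dropWhile (fun r => decide (r < f)), f ≤ x :=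
    fun x hx => pvDropWhileGe hs hx
  have hsplit : rev = rev.takeWhile (fun r => decide (r < f)) ++
      rev.dropWhile (fun r => decide (r < f)) := (List.takeWhile_append_dropWhile).symm
  have hfiltTw : (rev.takeWhile (fun r => decide (r < f))).filter
      (fun r => decide (f ≤ r) && decide (r - f ≤ t)) = [] := by
    rw [List.filter_eq_nil_iff]
    intro a ha
    have := List.mem_takeWhile_imp ha
    simp at this ⊢
    omega
  have hfilt : rev.filter (fun r => decide (f ≤ r) && decide (r - f ≤ t)) =
      (rev.dropWhile (fun r => decide (r < f))).filter
        (fun r => decide (f ≤ r) && decide (r - f ≤ t)) := by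
    conv_lhs => rw [hsplit]
    rw [List.filter_append, hfiltTw, List.nil_append]
  by_cases ht : 0 ≤ t
  · have htw : rev.takeWhile (fun r => decide (r ≤ f + t)) =
        rev.takeWhile (fun r => decide (r < f)) ++
          (rev.dropWhile (fun r => decide (r < f))).takeWhile (fun r => decide (r ≤ f + t)) := by
      conv_lhs => rw [hsplit]
      exact pvTwAppend (fun x hx => by
        have := List.mem_takeWhile_imp hx
        simp at this ⊢
        omega)
    rw [hdw, htw, List.length_append, Nat.add_sub_cancel_left, pvTakeTw,
      pvTwEqFilter hdws hge, ← hfilt]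
    rfl
  · have hle : (rev.takeWhile (fun r => decide (r ≤ f + t))).length ≤
        (rev.takeWhile (fun r => decide (r < f))).length :=
      pvTwLenMono (fun x hx => by simp at hx ⊢; omega)
    rw [Nat.sub_eq_zero_of_le hle, List.take_zero]
    have : rev.filter (fun r => decide (f ≤ r) && decide (r - f ≤ t)) = [] := by
      rw [List.filter_eq_nil_iff]
      intro a _
      simp
      omega
    unfold pvPiece
    rw [this]

-- pvAdvance computes j + the takeWhile length of the remaining suffix
theorem pvAdvanceEq (rev : List Int) (f : Int) (j : Nat) :
    pvAdvance rev f j = j + ((rev.drop j).takeWhile (fun r => decide (r < f))).length := by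
  fun_induction pvAdvance rev f j with
  | case1 j h hlt ih =>
    rw [List.drop_eq_getElem_cons h, List.takeWhile_cons_of_pos (by simpa using hlt)]
    simp only [List.length_cons] at *
    omega
  | case2 j h hlt =>
    rw [List.drop_eq_getElem_cons h, List.takeWhile_cons_of_neg (by simpa using hlt)]
    simp
  | case3 j h =>
    rw [List.drop_eq_nil_of_le (by omega)]
    simp

-- pvCollect appends the takeWhile-collected gaps
theorem pvCollectEq (rev : List Int) (f t : Int) (sj : Nat) (gaps : List Int) :
    pvCollect rev f t sj gaps =
      gaps ++ ((rev.drop sj).takeWhile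
        (fun r => decide (r - f ≤ t) && decide (f ≤ r))).map (fun r => r - f) := by
  fun_induction pvCollect rev f t sj gaps with
  | case1 sj gaps h hc ih =>
    rw [List.drop_eq_getElem_cons h, List.takeWhile_cons_of_pos (by simp; omega), ih]
    simp
  | case2 sj gaps h hc =>
    rw [List.drop_eq_getElem_cons h, List.takeWhile_cons_of_neg (by simp; omega)]
    simp
  | case3 sj gaps h =>
    rw [List.drop_eq_nil_of_le (by omega)]
    simp

-- the outer two-pointer loop produces the flatMap of pieces
theorem pvOuterEq (fwd rev : List Int) (t : Int)
    (hsf : fwd.Pairwise (· ≤ ·)) (hsr : rev.Pairwise (· ≤ ·)) :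
    ∀ (n i j : Nat) (gaps : List Int), fwd.length - i ≤ n → j ≤ rev.length →
    (∀ (k : Nat) (hk : k < fwd.length), i ≤ k → ∀ r ∈ rev.take j, r < fwd[k]) →
    pvOuter fwd rev t i j gaps = gaps ++ (fwd.drop i).flatMap (fun f => pvPiece rev f t) := by
  intro n
  induction n with
  | zero =>
    intro i j gaps hn hj hinv
    have hi : fwd.length ≤ i := by omega
    rw [pvOuter, dif_neg (by omega), List.drop_eq_nil_of_le hi]
    simp
  | succ n ih =>
    intro i j gaps hn hj hinv
    by_cases hi : i < fwd.length
    · by_cases hjlen : j < rev.length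
      · rw [pvOuter, dif_pos ⟨hi, hjlen⟩]
        show pvOuter fwd rev t (i + 1) (pvAdvance rev (fwd[i]'hi) j)
            (pvCollect rev (fwd[i]'hi) t (pvAdvance rev (fwd[i]'hi) j) gaps) =
          gaps ++ (fwd.drop i).flatMap (fun f => pvPiece rev f t)
        have hadv := pvAdvanceEq rev (fwd[i]'hi) j
        have hLle : ((rev.drop j).takeWhile (fun r => decide (r < fwd[i]'hi))).length ≤
            rev.length - j := by
          have h1 := pvTwLen (l := rev.drop j) (p := fun r => decide (r < fwd[i]'hi))
          simpa using h1
        rw [hadv, pvCollectEq]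
        set f := fwd[i]'hi with hf
        set L := ((rev.drop j).takeWhile (fun r => decide (r < f))).length with hL
        have hD : (rev.drop j).Pairwise (· ≤ ·) :=
          List.Pairwise.sublist (List.drop_sublist _ _) hsr
        have hdropD : rev.drop (j + L) = (rev.drop j).dropWhile (fun r => decide (r < f)) := by
          rw [← List.drop_drop, hL, pvDropTw]
        have hsDW : ((rev.drop j).dropWhile (fun r => decide (r < f))).Pairwise (· ≤ ·) :=
          List.Pairwise.sublist (List.dropWhile_sublist _) hD
        have hgeD : ∀ x ∈ (rev.drop j).dropWhile (fun r => decide (r < f)), f ≤ x :=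
          fun x hx => pvDropWhileGe hD hx
        have hpiece : ((rev.drop (j + L)).takeWhile
            (fun r => decide (r - f ≤ t) && decide (f ≤ r))).map (fun r => r - f) =
            pvPiece rev f t := by
          rw [hdropD]
          rw [pvTwCongr (l := (rev.drop j).dropWhile (fun r => decide (r < f)))
            (q := fun r => decide (r ≤ f + t))
            (fun x hx => by have h := hgeD x hx; rw [Bool.eq_iff_iff]; simp only [Bool.and_eq_true, decide_eq_true_eq]; omega)]
          rw [pvTwEqFilter hsDW hgeD]
          have hfidw : rev.filter (fun r => decide (f ≤ r) && decide (r - f ≤ t)) =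
              ((rev.drop j).dropWhile (fun r => decide (r < f))).filter
                (fun r => decide (f ≤ r) && decide (r - f ≤ t)) := by
            conv_lhs => rw [← List.take_append_drop j rev]
            rw [List.filter_append]
            have h1 : (rev.take j).filter (fun r => decide (f ≤ r) && decide (r - f ≤ t)) = [] := by
              rw [List.filter_eq_nil_iff]
              intro r hr
              have := hinv i hi (le_refl _) r hr
              simp
              omega
            conv_lhs => rw [← List.takeWhile_append_dropWhile
              (p := fun r => decide (r < f)) (l := rev.drop j)]
            rw [List.filter_append]
            have h2 : ((rev.drop j).takeWhile (fun r => decide (r < f))).filter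
                (fun r => decide (f ≤ r) && decide (r - f ≤ t)) = [] := by
              rw [List.filter_eq_nil_iff]
              intro r hr
              have := List.mem_takeWhile_imp hr
              simp at this ⊢
              omega
            rw [h1, h2]
            simp
          rw [← hfidw]
          rfl
        have hinv' : ∀ (k : Nat) (hk : k < fwd.length), i + 1 ≤ k →
            ∀ r ∈ rev.take (j + L), r < fwd[k] := by
          intro k hk hik r hr
          rw [List.take_add] at hr
          rcases List.mem_append.mp hr with hr | hr
          · exact hinv k hk (by omega) r hr
          · rw [hL, pvTakeTw] at hr
            have h1 := List.mem_takeWhile_imp hr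
            have h2 : f ≤ fwd[k] := hf ▸ pvSortedGet hsf (by omega) hk
            simp at h1
            omega
        rw [ih (i + 1) (j + L) _ (by omega) (by omega) hinv']
        rw [hpiece, List.drop_eq_getElem_cons hi, List.flatMap_cons, ← hf]
        rw [List.append_assoc]
      · have hjeq : j = rev.length := by omega
        rw [pvOuter, dif_neg (by omega)]
        have hnil : (fwd.drop i).flatMap (fun f => pvPiece rev f t) = [] := by
          rw [List.flatMap_eq_nil_iff]
          intro x hx
          obtain ⟨m, hm, rfl⟩ := List.mem_iff_getElem.mp hx
          unfold pvPiece
          rw [List.getElem_drop]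
          have : rev.filter (fun r => decide ((fwd[i + m]'(by
              rw [List.length_drop] at hm; omega)) ≤ r) &&
              decide (r - (fwd[i + m]'(by rw [List.length_drop] at hm; omega)) ≤ t)) = [] := by
            rw [List.filter_eq_nil_iff]
            intro r hr
            have hrj : r ∈ rev.take j := by rw [hjeq, List.take_length]; exact hr
            have := hinv (i + m) (by rw [List.length_drop] at hm; omega) (by omega) r hrj
            simp
            omega
          rw [this]
          rfl
        rw [hnil, List.append_nil]
    · rw [pvOuter, dif_neg (by omega), List.drop_eq_nil_of_le (by omega)]
      simp

-- B-side: one fold step is one piece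
theorem pvAltEq (fwd rev : List Int) (t : Int) (hsr : rev.Pairwise (· ≤ ·)) :
    fwd.foldl (fun gaps f =>
      (PySem.List.slice rev (some ((PySem.List.bisectLeft rev f : Nat) : Int))
          (some ((PySem.List.bisectRight rev (f + t) : Nat) : Int))).foldl
        (fun g r => g ++ [r - f]) gaps) [] =
      fwd.flatMap (fun f => pvPiece rev f t) := by
  have hfun : (fun (gaps : List Int) (f : Int) =>
      (PySem.List.slice rev (some ((PySem.List.bisectLeft rev f : Nat) : Int))
          (some ((PySem.List.bisectRight rev (f + t) : Nat) : Int))).foldl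
        (fun g r => g ++ [r - f]) gaps) =
      (fun (gaps : List Int) (f : Int) => gaps ++
        (PySem.List.slice rev (some ((PySem.List.bisectLeft rev f : Nat) : Int))
          (some ((PySem.List.bisectRight rev (f + t) : Nat) : Int))).map (fun r => r - f)) := by
    funext gaps f
    exact PySem.List.foldl_append_singleton_eq_map _ _ _
  rw [hfun, PySem.List.foldl_append_eq_flatMap, List.nil_append]
  exact List.flatMap_congr (fun f _ => by
    rw [PySem.List.slice_natCast, pvBisectLeftEq rev f hsr, pvBisectRightEq rev (f + t) hsr]
    exact pvSliceCore rev f t hsr)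

-- ===== VERDICT (by name: the statement is the Claim_ definition above) =====
theorem compute_fr_gaps_alternating_spec : Claim_equal_compute_fr_gaps_alternating := by
  intro pf pr t _
  unfold Spec_compute_fr_gaps_alternating compute_fr_gaps_alternating compute_fr_gaps_alternating_alt
  have hsf := PySem.List.sorted_pairwise pf (fun x => x)
  have hsr := PySem.List.sorted_pairwise pr (fun x => x)
  rw [pvOuterEq _ _ _ hsf hsr (PySem.List.sorted pf (fun x => x)).length 0 0 [] (by omega)
    (by omega) (by simp)]
  rw [pvAltEq _ _ _ hsr]
  simp
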